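-- pv_equiv track=rewrite | github.com/Jay-0001/Language-Guided-Robot-Manipulation-Using-Vision-Language-Transformers | dataset/grounding_format_conversion.py | build_caption_and_spans
-- ===== SOURCE A (Python) =====
-- def build_caption_and_spans(phrases):
--     """
--     Example output:
--     caption: "red sphere. blue sphere. green sphere."
--     spans: [[0, 11], [13, 24], [26, 38]]
--     """
--     caption = ""
--     spans = []
--     idx = 0
--
--     for p in phrases:
--         start = idx
--         caption += p + "."
--         end = len(caption)
--         spans.append([start, end - 1])
--         caption += " "
--         idx = len(caption)
--
--     caption = caption.strip()
--     return caption, spans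
-- ===== SOURCE B (Python) =====
-- def build_caption_and_spans(phrases):
--     caption = " ".join(p + "." for p in phrases).strip()
--     spans = []
--     start = 0
--     for p in phrases:
--         spans.append([start, start + len(p)])
--         start += len(p) + 2
--     return caption, spans
-- ===== Notes on version B (the rewrite author's own statement) =====
-- stated objective: simpler
-- what changed: B builds the caption once with a join+strip and computes the spans in a separate arithmetic pass over a running offset, instead of A's single loop that grows the caption string and reads its length after each append.
import Mathlib
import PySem

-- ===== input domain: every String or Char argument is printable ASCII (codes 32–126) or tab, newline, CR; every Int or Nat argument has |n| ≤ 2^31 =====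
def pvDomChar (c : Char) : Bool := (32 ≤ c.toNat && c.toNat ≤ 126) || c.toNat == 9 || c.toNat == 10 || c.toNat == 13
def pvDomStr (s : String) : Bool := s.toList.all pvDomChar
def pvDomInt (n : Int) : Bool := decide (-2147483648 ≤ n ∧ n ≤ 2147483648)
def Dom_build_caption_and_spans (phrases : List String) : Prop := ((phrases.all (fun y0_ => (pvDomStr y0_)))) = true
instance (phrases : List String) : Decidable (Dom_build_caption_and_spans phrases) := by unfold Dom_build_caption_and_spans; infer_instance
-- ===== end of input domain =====

-- B builds the caption with one join+strip and the spans in a separate arithmetic pass over a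
-- running offset, instead of A's single loop that grows the caption and measures it; same results.


-- ===== PORT A =====
-- A's for-loop over `phrases`, state = (caption, spans, idx), exactly A's statements in order.
def bcsLoopA : List String → String × List (List Int) × Int → String × List (List Int) × Int
  | [], st => st
  | p :: rest, (caption, spans, idx) =>
    let start := idx
    let caption := caption ++ p ++ "."
    let e := PySem.Str.len caption
    let spans := spans ++ [[start, e - 1]]
    let caption := caption ++ " "
    let idx := PySem.Str.len caption
    bcsLoopA rest (caption, spans, idx)

def build_caption_and_spans (phrases : List String) : String × List (List Int) :=
  let st := bcsLoopA phrases ("", [], 0)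
  (PySem.Str.strip st.1, st.2.1)

-- ===== PORT B =====
-- B's second pass: running offset `start`, appending [start, start+len p].
def bcsLoopB : List String → Int × List (List Int) → Int × List (List Int)
  | [], st => st
  | p :: rest, (start, spans) =>
    bcsLoopB rest (start + PySem.Str.len p + 2, spans ++ [[start, start + PySem.Str.len p]])

def build_caption_and_spans_alt (phrases : List String) : String × List (List Int) :=
  let caption := PySem.Str.strip (PySem.Str.join " " (phrases.map (fun p => p ++ ".")))
  let st := bcsLoopB phrases (0, [])
  (caption, st.2)

-- ===== PRECONDITION & SPEC =====
def Spec_build_caption_and_spans (phrases : List String) (out : String × List (List Int)) : Prop := out = build_caption_and_spans_alt phrases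
instance (phrases : List String) (out : String × List (List Int)) : Decidable (Spec_build_caption_and_spans phrases out) := by unfold Spec_build_caption_and_spans; infer_instance

-- ===== CLAIM (what is proved, stated in full; the proofs are below) =====
def Claim_equal_build_caption_and_spans : Prop := ∀ (phrases : List String), Dom_build_caption_and_spans phrases → Spec_build_caption_and_spans phrases (build_caption_and_spans phrases)

-- ===== LEMMAS AND PROOFS =====

theorem bcs_intercalate_cons_cons (a b : List Char) (t : List (List Char)) :
    List.intercalate [' '] (a :: b :: t) = a ++ [' '] ++ List.intercalate [' '] (b :: t) := by
  simp [List.intercalate, List.intersperse]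

-- A's spans equal B's spans, given the invariant idx = len caption.
theorem bcs_spans_eq (phrases : List String) :
    ∀ (caption : String) (spans : List (List Int)),
      (bcsLoopA phrases (caption, spans, PySem.Str.len caption)).2.1
        = (bcsLoopB phrases (PySem.Str.len caption, spans)).2 := by
  induction phrases with
  | nil => intro caption spans; rfl
  | cons p rest ih =>
    intro caption spans
    have h1 : PySem.Str.len (caption ++ p ++ ".") - 1
        = PySem.Str.len caption + PySem.Str.len p := by
      simp [PySem.Str.len_eq]; omega
    have h2 : PySem.Str.len (caption ++ p ++ "." ++ " ")
        = PySem.Str.len caption + PySem.Str.len p + 2 := by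
      simp [PySem.Str.len_eq]; omega
    simp only [bcsLoopA, bcsLoopB, h1]
    rw [ih (caption ++ p ++ "." ++ " ")]
    rw [h2]

-- A's caption loop, read off: it is a foldl appending p ++ ". ".
theorem bcs_capA_foldl (phrases : List String) :
    ∀ (c : String) (spans : List (List Int)) (idx : Int),
      (bcsLoopA phrases (c, spans, idx)).1
        = phrases.foldl (fun acc p => acc ++ p ++ "." ++ " ") c := by
  induction phrases with
  | nil => intro c spans idx; rfl
  | cons p rest ih => intro c spans idx; simp only [bcsLoopA, List.foldl]; rw [ih]

theorem bcs_capA_toList (phrases : List String) :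
    ∀ (c : String),
      (phrases.foldl (fun acc p => acc ++ p ++ "." ++ " ") c).toList
        = c.toList ++ (phrases.map (fun p => p.toList ++ ['.', ' '])).flatten := by
  induction phrases with
  | nil => intro c; simp
  | cons p rest ih =>
    intro c
    simp only [List.foldl, List.map, List.flatten]
    rw [ih]
    simp

-- flatten of (l ++ ['.',' ']) blocks = '.'-terminated blocks joined by ' ', plus a trailing space.
theorem bcs_flatten_intercalate (ps : List (List Char)) :
    (ps.map (fun l => l ++ ['.', ' '])).flatten
      = List.intercalate [' '] (ps.map (fun l => l ++ ['.']))
          ++ (if ps.isEmpty then [] else [' ']) := by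
  induction ps with
  | nil => simp [List.intercalate]
  | cons a rest ih =>
    cases rest with
    | nil => simp [List.intercalate]
    | cons b t =>
      simp only [List.map, List.flatten]
      rw [bcs_intercalate_cons_cons]
      have := ih
      simp only [List.map, List.flatten] at this
      rw [this]
      simp

theorem bcs_isspace_space : PySem.Chars.isspace ' ' = true := by decide

-- strip absorbs one trailing space.
theorem bcs_strip_append_space (x : List Char) :
    PySem.Chars.strip (x ++ [' ']) = PySem.Chars.strip x := by
  unfold PySem.Chars.strip PySem.Chars.lstrip PySem.Chars.rstrip
  rw [List.dropWhile_append]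
  by_cases h : (List.dropWhile PySem.Chars.isspace x).isEmpty
  · have hx : List.dropWhile PySem.Chars.isspace x = [] := List.isEmpty_iff.mp h
    simp [hx, List.dropWhile, bcs_isspace_space]
  · simp [h, bcs_isspace_space]

theorem bcs_caption_eq (phrases : List String) :
    PySem.Str.strip (bcsLoopA phrases ("", [], 0)).1
      = PySem.Str.strip (PySem.Str.join " " (phrases.map (fun p => p ++ "."))) := by
  apply String.toList_inj.mp
  rw [PySem.Str.toList_strip, PySem.Str.toList_strip, PySem.Str.toList_join]
  rw [bcs_capA_foldl, bcs_capA_toList]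
  have hmap : (phrases.map (fun p => p ++ ".")).map String.toList
      = (phrases.map String.toList).map (fun l => l ++ ['.']) := by
    simp [List.map_map, Function.comp]
  rw [hmap]
  have := bcs_flatten_intercalate (phrases.map String.toList)
  simp only [List.map_map] at this ⊢
  rw [show ((fun l => l ++ ['.', ' ']) ∘ String.toList)
        = (fun p : String => p.toList ++ ['.', ' ']) from rfl] at this
  rw [this]
  cases phrases with
  | nil => simp [PySem.Chars.join]
  | cons a t =>
    simp only [List.map_cons, List.isEmpty_cons, Bool.false_eq_true, if_false,
      ← List.append_assoc]
    rw [bcs_strip_append_space]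
    rfl

-- ===== VERDICT (by name: the statement is the Claim_ definition above) =====
theorem build_caption_and_spans_spec : Claim_equal_build_caption_and_spans := by
  intro phrases _
  unfold Spec_build_caption_and_spans build_caption_and_spans build_caption_and_spans_alt
  refine Prod.ext (bcs_caption_eq phrases) ?_
  have h0 : (0 : Int) = PySem.Str.len "" := by decide
  show (bcsLoopA phrases ("", [], 0)).2.1 = (bcsLoopB phrases (0, [])).2
  rw [h0, bcs_spans_eq]
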